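-- pv_equiv track=rewrite | github.com/michaeltmk/google_foobar | level_5/Expanding Nebula/preparation.py | encode_ref_list
-- ===== SOURCE A (Python) =====
-- def encode_ref_list(basic_units):
--     result = {}
--     for basic_unit in basic_units:
--         up = basic_unit[:2]
--         down = basic_unit[2:]
--         left = basic_unit[0] + basic_unit[2]
--         right = basic_unit[1] + basic_unit[3]
--         result[up] = result.get(up, []) + [
--             {"up": up, "down": down, "left": left, "right": right}
--         ]
--     return result
-- ===== SOURCE B (Python) =====
-- def encode_ref_list(basic_units):
--     # Group by first computing the distinct top-row keys in first-occurrence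
--     # order, then collecting each group's entries with one comprehension per key.
--     ups = [u[:2] for u in basic_units]
--     return {
--         up: [
--             {"up": up, "down": u[2:], "left": u[0] + u[2], "right": u[1] + u[3]}
--             for u in basic_units
--             if u[:2] == up
--         ]
--         for up in dict.fromkeys(ups)
--     }
-- ===== Notes on version B (the rewrite author's own statement) =====
-- stated objective: alternative
-- what changed: Replaces A's single-pass incremental dict-bucketing (with quadratic per-key list concatenation) by a two-phase strategy: dedupe the keys in first-occurrence order, then build each group with one filtering pass per key.
import Mathlib
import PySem

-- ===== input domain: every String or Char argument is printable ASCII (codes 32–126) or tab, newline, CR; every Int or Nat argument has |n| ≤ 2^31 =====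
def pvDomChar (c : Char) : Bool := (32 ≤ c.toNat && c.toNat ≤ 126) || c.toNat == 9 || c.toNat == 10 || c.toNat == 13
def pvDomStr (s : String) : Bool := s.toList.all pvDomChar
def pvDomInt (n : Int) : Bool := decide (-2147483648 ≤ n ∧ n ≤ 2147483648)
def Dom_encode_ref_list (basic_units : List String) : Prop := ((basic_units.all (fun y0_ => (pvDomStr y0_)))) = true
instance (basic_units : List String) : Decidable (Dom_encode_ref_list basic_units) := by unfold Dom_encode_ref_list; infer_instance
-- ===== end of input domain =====

-- B groups by dedup-keys-then-filter-per-key instead of A's incremental dict bucketing; same result, proved equal on Pre_.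

-- ===== PORT A =====
def encode_ref_list (basic_units : List String) : List (String × List (List (String × String))) :=
  (basic_units.foldl (fun result bu =>
    let up := PySem.Str.slice bu none (some 2)
    let down := PySem.Str.slice bu (some 2) none
    let left := String.ofList [PySem.List.pyGetD bu.toList 0 ' ', PySem.List.pyGetD bu.toList 2 ' ']
    let right := String.ofList [PySem.List.pyGetD bu.toList 1 ' ', PySem.List.pyGetD bu.toList 3 ' ']
    result.insert up (result.getD up [] ++
      [[("up", up), ("down", down), ("left", left), ("right", right)]])
  ) PySem.Dict.empty).items

-- ===== PORT B =====
def encode_ref_list_alt (basic_units : List String) : List (String × List (List (String × String))) :=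
  let ups := basic_units.map (fun u => PySem.Str.slice u none (some 2))
  (PySem.List.dedup ups).map (fun up =>
    (up, (basic_units.filter (fun u => PySem.Str.slice u none (some 2) == up)).map (fun u =>
      [("up", up),
       ("down", PySem.Str.slice u (some 2) none),
       ("left", String.ofList [PySem.List.pyGetD u.toList 0 ' ', PySem.List.pyGetD u.toList 2 ' ']),
       ("right", String.ofList [PySem.List.pyGetD u.toList 1 ' ', PySem.List.pyGetD u.toList 3 ' '])])))

-- ===== PRECONDITION & SPEC =====
-- Pre_ excludes exactly the inputs on which A raises IndexError: a unit shorter than 4 characters.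
def Pre_encode_ref_list (basic_units : List String) : Prop :=
  ∀ u ∈ basic_units, 4 ≤ u.toList.length
instance (basic_units : List String) : Decidable (Pre_encode_ref_list basic_units) := by
  unfold Pre_encode_ref_list; infer_instance
def pvWitness_encode_ref_list : List String := (["abcd", "abef", "cdxy"])
def Spec_encode_ref_list (basic_units : List String) (out : List (String × List (List (String × String)))) : Prop := out = encode_ref_list_alt basic_units
instance (basic_units : List String) (out : List (String × List (List (String × String)))) : Decidable (Spec_encode_ref_list basic_units out) := by unfold Spec_encode_ref_list; infer_instance

-- ===== CLAIM (what is proved, stated in full; the proofs are below) =====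
def Claim_equal_encode_ref_list : Prop := ∀ (basic_units : List String), Dom_encode_ref_list basic_units → Pre_encode_ref_list basic_units → Spec_encode_ref_list basic_units (encode_ref_list basic_units)

-- ===== LEMMAS AND PROOFS =====

def pvKey (u : String) : String := PySem.Str.slice u none (some 2)

def pvEntry (u : String) : List (String × String) :=
  [("up", pvKey u),
   ("down", PySem.Str.slice u (some 2) none),
   ("left", String.ofList [PySem.List.pyGetD u.toList 0 ' ', PySem.List.pyGetD u.toList 2 ' ']),
   ("right", String.ofList [PySem.List.pyGetD u.toList 1 ' ', PySem.List.pyGetD u.toList 3 ' '])]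

-- A's bucketing loop, rewritten as the canonical modify-grouping fold over (key, entry) pairs.
theorem pv_loop_eq (l : List String) :
    l.foldl (fun d u => d.insert (pvKey u) (d.getD (pvKey u) [] ++ [pvEntry u])) PySem.Dict.empty
    = (l.map (fun u => (pvKey u, pvEntry u))).foldl
        (fun d p => d.modify p.1 [] (· ++ [p.2])) PySem.Dict.empty := by
  rw [List.foldl_map]; rfl

-- The items of A's grouping dict are: distinct keys in first-occurrence order, each with its filtered entries.
theorem pv_group (l : List String) :
    (l.foldl (fun d u => d.insert (pvKey u) (d.getD (pvKey u) [] ++ [pvEntry u])) PySem.Dict.empty).items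
    = (PySem.List.dedup (l.map pvKey)).map (fun up =>
        (up, (l.filter (fun u => pvKey u == up)).map pvEntry)) := by
  rw [pv_loop_eq]
  set pairs := l.map (fun u => (pvKey u, pvEntry u)) with hp
  have hnd : ((pairs.foldl (fun d p => d.modify p.1 [] (· ++ [p.2])) PySem.Dict.empty)).keys.Nodup :=
    PySem.Dict.nodup_keys_foldl_modify_key pairs Prod.fst [] (fun d p => (· ++ [p.2]))
      PySem.Dict.empty PySem.Dict.nodup_keys_empty
  rw [PySem.Dict.items_eq_map_keys _ hnd []]
  rw [PySem.Dict.keys_foldl_modify_key]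
  have hkeys : pairs.map Prod.fst = l.map pvKey := by simp [hp]
  rw [hkeys]
  have hupd : PySem.Set.update (PySem.Dict.empty : PySem.Dict String (List (List (String × String)))).keys (l.map pvKey) = PySem.List.dedup (l.map pvKey) := rfl
  rw [hupd]
  apply List.map_congr_left
  intro up hup
  congr 1
  rw [PySem.Dict.getD_foldl_modify_append]
  simp only [PySem.Dict.getD_empty, List.nil_append, hp, List.filter_map, List.map_map]
  rfl

theorem encode_ref_list_spec' (basic_units : List String) :
    encode_ref_list basic_units = encode_ref_list_alt basic_units := by
  show (basic_units.foldl (fun d u => d.insert (pvKey u) (d.getD (pvKey u) [] ++ [pvEntry u])) PySem.Dict.empty).items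
     = (PySem.List.dedup (basic_units.map pvKey)).map (fun up =>
        (up, (basic_units.filter (fun u => pvKey u == up)).map (fun u =>
          [("up", up),
           ("down", PySem.Str.slice u (some 2) none),
           ("left", String.ofList [PySem.List.pyGetD u.toList 0 ' ', PySem.List.pyGetD u.toList 2 ' ']),
           ("right", String.ofList [PySem.List.pyGetD u.toList 1 ' ', PySem.List.pyGetD u.toList 3 ' '])])))
  rw [pv_group]
  apply List.map_congr_left
  intro up hup
  congr 1
  apply List.map_congr_left
  intro u hu
  have hk : pvKey u = up := eq_of_beq (List.mem_filter.mp hu).2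
  simp [pvEntry, hk]

-- ===== VERDICT (by name: the statement is the Claim_ definition above) =====
theorem encode_ref_list_spec : Claim_equal_encode_ref_list := by
  intro bs _ _
  unfold Spec_encode_ref_list
  exact encode_ref_list_spec' bs
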